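-- pv_equiv track=rewrite | github.com/Thevinh8386/Hit_Python_Private | Buoi4/Bai2.py | mix_list
-- ===== SOURCE A (Python) =====
-- def mix_list(a, b):
--     c = []
--     min_list = min(len(a), len(b))
--
--     for i in range(min_list):
--         c.append(a[i])
--         c.append(b[i])
--
--     if len(a) > min_list:
--         c.extend(a[min_list:])
--
--     if len(b) > min_list:
--         c.extend(b[min_list:])
--
--     return c
-- ===== SOURCE B (Python) =====
-- def mix_list(a, b):
--     m = min(len(a), len(b))
--     tail = a if len(a) > len(b) else b
--     return [(a if p % 2 == 0 else b)[p // 2] if p < 2 * m else tail[p - m]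
--             for p in range(len(a) + len(b))]
-- ===== Notes on version B (the rewrite author's own statement) =====
-- stated objective: alternative
-- what changed: B builds the result by a closed-form index map: one comprehension over output positions p in range(len(a)+len(b)) computing each element directly via parity/halving arithmetic (a[p//2] or b[p//2] for p < 2*min, tail[p-min] after), replacing A's interleave loop with appends plus two conditional extend branches.
import Mathlib
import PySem

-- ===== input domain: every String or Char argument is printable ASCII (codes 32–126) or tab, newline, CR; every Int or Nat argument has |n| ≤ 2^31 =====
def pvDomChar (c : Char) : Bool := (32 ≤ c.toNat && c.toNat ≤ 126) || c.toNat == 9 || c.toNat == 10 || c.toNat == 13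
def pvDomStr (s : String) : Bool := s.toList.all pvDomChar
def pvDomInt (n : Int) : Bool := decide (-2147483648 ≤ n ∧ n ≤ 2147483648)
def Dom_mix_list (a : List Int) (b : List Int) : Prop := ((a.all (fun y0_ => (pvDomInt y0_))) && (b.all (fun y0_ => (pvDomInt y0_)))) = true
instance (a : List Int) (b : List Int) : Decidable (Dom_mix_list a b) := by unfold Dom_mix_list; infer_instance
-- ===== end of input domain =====

-- B replaces A's interleave loop + two extend branches with a closed-form index map over
-- output positions (objective: alternative; same asymptotic cost).

-- ===== PORT A =====
-- the for-loop over range(min_list), as structural recursion on the loop count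
-- (a[i]/b[i] via pyGetD; the index is always in range here, so this is exact)
def mixLoopA (a : List Int) (b : List Int) : Nat → List Int
  | 0 => []
  | k + 1 => mixLoopA a b k ++ [PySem.List.pyGetD a (k : Int) 0] ++ [PySem.List.pyGetD b (k : Int) 0]

def mix_list (a : List Int) (b : List Int) : List Int :=
  let min_list := min a.length b.length
  let c := mixLoopA a b min_list
  let c := if a.length > min_list then c ++ PySem.List.slice a (some (min_list : Int)) none else c
  let c := if b.length > min_list then c ++ PySem.List.slice b (some (min_list : Int)) none else c
  c

-- ===== PORT B =====
-- the comprehension body: every index used is nonnegative and in range, so Nat getD,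
-- Nat division (p // 2 with p ≥ 0) and Nat subtraction (p - m with p ≥ m) are exact
-- ports of Python's indexing, // and -.
def mixIdx (a : List Int) (b : List Int) (m : Nat) (tail : List Int) (p : Nat) : Int :=
  if p < 2 * m then (if p % 2 == 0 then a else b).getD (p / 2) 0
  else tail.getD (p - m) 0

-- range(len(a)+len(b)) ported as List.range (the bound is a Nat, so this is exact)
def mix_list_alt (a : List Int) (b : List Int) : List Int :=
  let m := min a.length b.length
  let tail := if a.length > b.length then a else b
  (List.range (a.length + b.length)).map (mixIdx a b m tail)

-- ===== PRECONDITION & SPEC =====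
def Spec_mix_list (a : List Int) (b : List Int) (out : List Int) : Prop := out = mix_list_alt a b
instance (a : List Int) (b : List Int) (out : List Int) : Decidable (Spec_mix_list a b out) := by unfold Spec_mix_list; infer_instance

-- ===== CLAIM (what is proved, stated in full; the proofs are below) =====
def Claim_equal_mix_list : Prop := ∀ (a : List Int) (b : List Int), Dom_mix_list a b → Spec_mix_list a b (mix_list a b)

-- ===== LEMMAS AND PROOFS =====

theorem pyGetD_int_cons_succ (x : Int) (xs : List Int) (k : Nat) :
    PySem.List.pyGetD (x :: xs) ((k : Int) + 1) 0 = PySem.List.pyGetD xs (k : Int) 0 := by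
  have h : ((k : Int) + 1) = ((k + 1 : Nat) : Int) := by push_cast; ring
  rw [h, PySem.List.pyGetD_natCast, PySem.List.pyGetD_natCast, List.getD_cons_succ]

theorem mixLoopA_cons (x y : Int) (a b : List Int) (k : Nat) :
    mixLoopA (x :: a) (y :: b) (k + 1) = x :: y :: mixLoopA a b k := by
  induction k with
  | zero => simp [mixLoopA]
  | succ k ih =>
      rw [show mixLoopA (x :: a) (y :: b) (k + 1 + 1)
            = mixLoopA (x :: a) (y :: b) (k + 1) ++ [PySem.List.pyGetD (x :: a) ((k + 1 : Nat) : Int) 0]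
              ++ [PySem.List.pyGetD (y :: b) ((k + 1 : Nat) : Int) 0] from rfl, ih]
      push_cast
      simp [pyGetD_int_cons_succ, PySem.List.pyGetD_natCast, mixLoopA]

theorem mix_list_nil_left (b : List Int) : mix_list [] b = b := by
  cases b with
  | nil => simp [mix_list, mixLoopA]
  | cons y b =>
      simp [mix_list, mixLoopA, PySem.List.slice_zero_start, PySem.List.slice_none_none]

theorem mix_list_nil_right (x : Int) (a : List Int) : mix_list (x :: a) [] = x :: a := by
  simp [mix_list, mixLoopA, PySem.List.slice_zero_start, PySem.List.slice_none_none]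

theorem mix_list_cons (x y : Int) (a b : List Int) :
    mix_list (x :: a) (y :: b) = x :: y :: mix_list a b := by
  have hm : min (x :: a).length (y :: b).length = min a.length b.length + 1 := by
    simp [Nat.succ_min_succ]
  have hsa : PySem.List.slice (x :: a) (some ((min a.length b.length + 1 : Nat) : Int)) none
      = PySem.List.slice a (some ((min a.length b.length : Nat) : Int)) none := by
    rw [PySem.List.slice_from_natCast, PySem.List.slice_from_natCast]; simp
  have hsb : PySem.List.slice (y :: b) (some ((min a.length b.length + 1 : Nat) : Int)) none
      = PySem.List.slice b (some ((min a.length b.length : Nat) : Int)) none := by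
    rw [PySem.List.slice_from_natCast, PySem.List.slice_from_natCast]; simp
  have h1 : (x :: a).length > min a.length b.length + 1 ↔ a.length > min a.length b.length := by
    simp only [List.length_cons]; omega
  have h2 : (y :: b).length > min a.length b.length + 1 ↔ b.length > min a.length b.length := by
    simp only [List.length_cons]; omega
  simp only [mix_list, hm, mixLoopA_cons, h1, h2, hsa, hsb]
  split_ifs <;> simp

theorem map_range_getD (l : List Int) :
    (List.range l.length).map (fun p => l.getD p 0) = l := by
  apply List.ext_getElem
  · simp
  · intro i h1 h2
    have h2' : i < l.length := by simpa using h2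
    simp [List.getElem?_eq_getElem h2']

theorem mix_alt_nil_left (b : List Int) : mix_list_alt [] b = b := by
  simp only [mix_list_alt, List.length_nil, Nat.zero_min, Nat.zero_add]
  rw [if_neg (by omega : ¬ (0 : Nat) > b.length)]
  rw [show mixIdx [] b 0 b = fun p => b.getD p 0 from funext fun p => by simp [mixIdx]]
  exact map_range_getD b

theorem mix_alt_nil_right (x : Int) (a : List Int) : mix_list_alt (x :: a) [] = x :: a := by
  simp only [mix_list_alt, List.length_cons, List.length_nil, Nat.min_zero, Nat.add_zero]
  rw [if_pos (by omega : a.length + 1 > 0)]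
  rw [show mixIdx (x :: a) [] 0 (x :: a) = fun p => (x :: a).getD p 0 from
    funext fun p => by simp [mixIdx]]
  exact map_range_getD (x :: a)

theorem mixIdx_shift (x y : Int) (a b : List Int) (m : Nat) (z : Int) (tail : List Int) (p : Nat) :
    mixIdx (x :: a) (y :: b) (m + 1) (z :: tail) (p + 2) = mixIdx a b m tail p := by
  unfold mixIdx
  by_cases hp : p < 2 * m
  · have h2 : p + 2 < 2 * (m + 1) := by omega
    rw [if_pos h2, if_pos hp]
    have hmod : (p + 2) % 2 = p % 2 := by omega
    have hdiv : (p + 2) / 2 = p / 2 + 1 := by omega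
    rw [hmod, hdiv]
    by_cases he : p % 2 = 0 <;> simp [he]
  · have h2 : ¬ (p + 2 < 2 * (m + 1)) := by omega
    rw [if_neg h2, if_neg hp]
    have : p + 2 - (m + 1) = (p - m) + 1 := by omega
    rw [this, List.getD_cons_succ]

theorem mix_alt_cons (x y : Int) (a b : List Int) :
    mix_list_alt (x :: a) (y :: b) = x :: y :: mix_list_alt a b := by
  have hm : min (x :: a).length (y :: b).length = min a.length b.length + 1 := by
    simp [Nat.succ_min_succ]
  have hlen : (x :: a).length + (y :: b).length = a.length + b.length + 2 := by
    simp; omega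
  have htail : (if (x :: a).length > (y :: b).length then (x :: a) else (y :: b))
      = (if a.length > b.length then x else y)
        :: (if a.length > b.length then a else b) := by
    by_cases h : a.length > b.length <;> simp [h]
  simp only [mix_list_alt, hm, hlen, htail]
  rw [show a.length + b.length + 2 = (a.length + b.length + 1) + 1 from rfl,
    List.range_succ_eq_map, List.range_succ_eq_map]
  simp only [List.map_cons, List.map_map]
  have h0 : mixIdx (x :: a) (y :: b) (min a.length b.length + 1)
      ((if a.length > b.length then x else y) :: (if a.length > b.length then a else b)) 0 = x := by
    unfold mixIdx
    rw [if_pos (by omega : 0 < 2 * (min a.length b.length + 1))]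
    simp
  have h1 : mixIdx (x :: a) (y :: b) (min a.length b.length + 1)
      ((if a.length > b.length then x else y) :: (if a.length > b.length then a else b))
      (Nat.succ 0) = y := by
    unfold mixIdx
    rw [if_pos (by omega : Nat.succ 0 < 2 * (min a.length b.length + 1))]
    simp
  rw [h0, h1]
  congr 1
  congr 1
  apply List.map_congr_left
  intro p _
  show mixIdx (x :: a) (y :: b) (min a.length b.length + 1)
      ((if a.length > b.length then x else y) :: (if a.length > b.length then a else b))
      (p + 2) = mixIdx a b (min a.length b.length) (if a.length > b.length then a else b) p
  exact mixIdx_shift x y a b (min a.length b.length)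
    (if a.length > b.length then x else y) (if a.length > b.length then a else b) p

theorem mix_eq (a b : List Int) : mix_list a b = mix_list_alt a b := by
  induction a generalizing b with
  | nil => rw [mix_list_nil_left, mix_alt_nil_left]
  | cons x a ih =>
      cases b with
      | nil => rw [mix_list_nil_right, mix_alt_nil_right]
      | cons y b => rw [mix_list_cons, mix_alt_cons, ih]

-- ===== VERDICT (by name: the statement is the Claim_ definition above) =====
theorem mix_list_spec : Claim_equal_mix_list := by
  intro a b _
  show mix_list a b = mix_list_alt a b
  exact mix_eq a b
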